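-- pv_equiv track=rewrite | github.com/Mozzie11/DataMining_Assignments | Assignment1/FpGrowth.py | countfptree
-- ===== SOURCE A (Python) =====
-- def subsetsbinary(datasets):
--     N=len(datasets)
--     subsets=[]
--     for i in range(2**N):
--         subset = []
--         for j in range(N):
--             if(i>>j)%2==1:
--                 subset.append(datasets[j])
--         subsets.append(subset)
--     del subsets[0]
--     for i in list(subsets):
--         if datasets[0] not in i:
--             subsets.remove(i)
--     return subsets
--
-- def countfptree(allconfptree,maxleafsize):
--     allfrequentdataset={}
--     allfrequentdataset1={}
--     freqsetonkey=[]
--     for key,confptreeonkey in allconfptree.items():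
--         tmp={}
--         freqset={}
--         #Calculate condition fptree about key
--         for tree in confptreeonkey:
--             for treeitem,num in tree.items():
--                 if treeitem in tmp:
--                     tmp[treeitem]=tmp[treeitem]+num
--                 else:
--                     tmp[treeitem]=num
--                 if 'Null Set' in tmp:
--                     del tmp['Null Set']
--         for tmpitem,num in tmp.items():
--             if num>=maxleafsize:
--                 freqset[tmpitem]=num
--         freqsetonkey.append(freqset)
--
--         subsets=subsetsbinary(list(freqset.keys()))
--         for subset in subsets:
--             count=0
--             lensubset=len(subset)
--             for tree in confptreeonkey:
--                 itemcount=0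
--                 for subsetitem in subset:
--                     if subsetitem in tree:
--                         itemcount=itemcount+1
--                 if itemcount==lensubset:
--                     count=count+tree[subsetitem]
--             if count>=maxleafsize:
--                 allfrequentdataset[tuple(subset)]=count
--             allfrequentdataset1[tuple(subset)]=count
--     return allfrequentdataset,freqsetonkey,allfrequentdataset1
-- ===== SOURCE B (Python) =====
-- def countfptree(allconfptree, maxleafsize):
--     allfrequentdataset = {}
--     allfrequentdataset1 = {}
--     freqsetonkey = []
--     for trees in allconfptree.values():
--         # total count per item over all trees, ignoring the 'Null Set' root
--         tmp = {}
--         for tree in trees: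
--             for item, num in tree.items():
--                 if item != 'Null Set':
--                     tmp[item] = tmp.get(item, 0) + num
--         freqset = {item: num for item, num in tmp.items() if num >= maxleafsize}
--         freqsetonkey.append(freqset)
--         items = list(freqset)
--         # one pass over the trees: every tree credits each nonempty subset of the
--         # frequent items it contains with the count it stores for that subset's
--         # last item
--         support = {}
--         for tree in trees:
--             subs = [()]
--             for item in items:
--                 if item in tree:
--                     subs += [s + (item,) for s in subs]
--             for s in subs[1:]:
--                 support[s] = support.get(s, 0) + tree[s[-1]]
--         # emit the subsets that contain the first frequent item, in mask order
--         n = len(items)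
--         for m in range(1, 1 << n):
--             if m & 1:
--                 subset = tuple(items[j] for j in range(n) if m >> j & 1)
--                 count = support.get(subset, 0)
--                 if count >= maxleafsize:
--                     allfrequentdataset[subset] = count
--                 allfrequentdataset1[subset] = count
--     return allfrequentdataset, freqsetonkey, allfrequentdataset1
-- ===== Notes on version B (the rewrite author's own statement) =====
-- stated objective: alternative
-- what changed: Instead of generating all bitmask subsets and rescanning every conditional tree for each subset, B makes a single pass over the trees per key, crediting each nonempty subset of a tree's frequent items in a support dictionary, then emits the subsets containing the first frequent item in mask order via dictionary lookup.
import Mathlib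
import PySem

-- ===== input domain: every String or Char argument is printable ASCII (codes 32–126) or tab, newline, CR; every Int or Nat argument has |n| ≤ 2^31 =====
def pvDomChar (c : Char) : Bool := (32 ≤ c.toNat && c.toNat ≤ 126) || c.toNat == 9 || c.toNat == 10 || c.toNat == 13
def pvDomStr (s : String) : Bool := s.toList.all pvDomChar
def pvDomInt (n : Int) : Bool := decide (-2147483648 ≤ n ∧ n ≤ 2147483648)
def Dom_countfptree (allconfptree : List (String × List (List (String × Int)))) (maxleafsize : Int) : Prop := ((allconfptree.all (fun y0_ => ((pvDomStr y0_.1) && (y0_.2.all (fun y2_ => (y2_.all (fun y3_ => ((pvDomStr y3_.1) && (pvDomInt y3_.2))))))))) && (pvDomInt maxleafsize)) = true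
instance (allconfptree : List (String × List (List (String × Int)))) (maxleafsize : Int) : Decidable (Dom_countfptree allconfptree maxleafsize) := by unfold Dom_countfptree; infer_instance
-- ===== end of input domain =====

-- B replaces A's per-subset rescans of the conditional trees by a single pass over the trees
-- that credits each subset of a tree's frequent items in a support dictionary; objective: alternative.

-- ===== PORT A =====
-- `datasets[j]` always has j < len(datasets) (getD is exact); `datasets[0]` is only evaluated
-- inside the removal loop, which runs only when subsets ≠ [], forcing datasets ≠ [] (headI exact
-- there); `subsets.remove(i)` always finds i (i is still present when its snapshot turn comes),
-- so remove? is always some and the .getD fallback is never taken.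
def subsetsbinary (datasets : List String) : List (List String) :=
  let N := datasets.length
  let subsets := (List.range (2 ^ N)).foldl (fun subsets i =>
    subsets ++ [(List.range N).foldl (fun subset j =>
      if (i >>> j) % 2 == 1 then subset ++ [datasets.getD j ""] else subset) []]) []
  let subsets := subsets.tail   -- del subsets[0]
  subsets.foldl (fun cur i =>
    if datasets.headI ∈ i then cur else (PySem.List.remove? cur i).getD cur) subsets

-- body of A's `for key,confptreeonkey in allconfptree.items()` loop; state = (allfrequentdataset,
-- freqsetonkey, allfrequentdataset1).  The trees are Python dicts: membership and lookup go
-- through PySem.Dict.  `tree[subsetitem]` reads the LAST element of `subset` (the leaked loop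
-- variable) and is only reached when every subset item is a key of `tree`, so getD is exact.
def pvKeyStepA (maxleafsize : Int)
    (st : PySem.Dict (List String) Int × List (List (String × Int)) × PySem.Dict (List String) Int)
    (kv : String × List (List (String × Int))) :
    PySem.Dict (List String) Int × List (List (String × Int)) × PySem.Dict (List String) Int :=
  let confptreeonkey := kv.2
  let tmp : PySem.Dict String Int := confptreeonkey.foldl (fun tmp tree =>
    tree.foldl (fun (tmp : PySem.Dict String Int) p =>
      let tmp := if tmp.contains p.1 then tmp.insert p.1 (tmp.getD p.1 0 + p.2)
                 else tmp.insert p.1 p.2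
      if tmp.contains "Null Set" then tmp.erase "Null Set" else tmp) tmp) PySem.Dict.empty
  let freqset : PySem.Dict String Int := tmp.items.foldl (fun fs p =>
    if maxleafsize ≤ p.2 then fs.insert p.1 p.2 else fs) PySem.Dict.empty
  let fsk := st.2.1 ++ [freqset.items]
  let subsets := subsetsbinary freqset.keys
  let ad := subsets.foldl (fun (ad : PySem.Dict (List String) Int × PySem.Dict (List String) Int) subset =>
    let lensubset : Int := subset.length
    let count : Int := confptreeonkey.foldl (fun count tree =>
      let itemcount : Int := subset.foldl (fun c si =>
        if (PySem.Dict.mk tree).contains si then c + 1 else c) 0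
      if itemcount == lensubset then count + (PySem.Dict.mk tree).getD (subset.getLastD "") 0
      else count) 0
    let afd := if maxleafsize ≤ count then ad.1.insert subset count else ad.1
    (afd, ad.2.insert subset count)) (st.1, st.2.2)
  (ad.1, fsk, ad.2)

def countfptree (allconfptree : List (String × List (List (String × Int)))) (maxleafsize : Int) : (List (List String × Int)) × (List (List (String × Int))) × (List (List String × Int)) :=
  let st := allconfptree.foldl (pvKeyStepA maxleafsize) (PySem.Dict.empty, [], PySem.Dict.empty)
  (st.1.items, st.2.1, st.2.2.items)

-- ===== PORT B =====
-- body of B's `for trees in allconfptree.values()` loop.  tmp's keys are distinct, so the dict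
-- comprehension for freqset is a filter of tmp's items.  Every s in subs[1:] ends with a key of
-- tree, so `tree[s[-1]]` is getD (exact).  The masks m of `range(1, 1 << n)` are the naturals
-- 1 .. 2^n-1.
def pvKeyStepB (maxleafsize : Int)
    (st : PySem.Dict (List String) Int × List (List (String × Int)) × PySem.Dict (List String) Int)
    (kv : String × List (List (String × Int))) :
    PySem.Dict (List String) Int × List (List (String × Int)) × PySem.Dict (List String) Int :=
  let trees := kv.2
  let tmp : PySem.Dict String Int := trees.foldl (fun tmp tree =>
    tree.foldl (fun (tmp : PySem.Dict String Int) p =>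
      if p.1 == "Null Set" then tmp else tmp.insert p.1 (tmp.getD p.1 0 + p.2)) tmp) PySem.Dict.empty
  let freqset : List (String × Int) := tmp.items.filter (fun p => maxleafsize ≤ p.2)
  let fsk := st.2.1 ++ [freqset]
  let items := freqset.map Prod.fst
  let support : PySem.Dict (List String) Int := trees.foldl (fun support tree =>
    let subs : List (List String) := items.foldl (fun subs item =>
      if (PySem.Dict.mk tree).contains item then subs ++ subs.map (fun s => s ++ [item]) else subs) [[]]
    subs.tail.foldl (fun sup s =>
      sup.insert s (sup.getD s 0 + (PySem.Dict.mk tree).getD (s.getLastD "") 0)) support) PySem.Dict.empty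
  let n := items.length
  let ad := (List.range' 1 (2 ^ n - 1)).foldl (fun (ad : PySem.Dict (List String) Int × PySem.Dict (List String) Int) m =>
    if m &&& 1 == 1 then
      let subset := ((List.range n).filter (fun j => (m >>> j) &&& 1 == 1)).map (fun j => items.getD j "")
      let count := support.getD subset 0
      let afd := if maxleafsize ≤ count then ad.1.insert subset count else ad.1
      (afd, ad.2.insert subset count)
    else ad) (st.1, st.2.2)
  (ad.1, fsk, ad.2)

def countfptree_alt (allconfptree : List (String × List (List (String × Int)))) (maxleafsize : Int) : (List (List String × Int)) × (List (List (String × Int))) × (List (List String × Int)) :=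
  let st := allconfptree.foldl (pvKeyStepB maxleafsize) (PySem.Dict.empty, [], PySem.Dict.empty)
  (st.1.items, st.2.1, st.2.2.items)

-- ===== PRECONDITION & SPEC =====
def Spec_countfptree (allconfptree : List (String × List (List (String × Int)))) (maxleafsize : Int) (out : (List (List String × Int)) × (List (List (String × Int))) × (List (List String × Int))) : Prop := out = countfptree_alt allconfptree maxleafsize
instance (allconfptree : List (String × List (List (String × Int)))) (maxleafsize : Int) (out : (List (List String × Int)) × (List (List (String × Int))) × (List (List String × Int))) : Decidable (Spec_countfptree allconfptree maxleafsize out) := by unfold Spec_countfptree; infer_instance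

-- ===== CLAIM (what is proved, stated in full; the proofs are below) =====
def Claim_equal_countfptree : Prop := ∀ (allconfptree : List (String × List (List (String × Int)))) (maxleafsize : Int), Dom_countfptree allconfptree maxleafsize → Spec_countfptree allconfptree maxleafsize (countfptree allconfptree maxleafsize)

-- ===== LEMMAS AND PROOFS =====

def msel (l : List String) (m : Nat) : List String :=
  ((List.range l.length).filter (fun j => (m >>> j) % 2 == 1)).map (fun j => l.getD j "")

theorem msel_cons (x : String) (l : List String) (m : Nat) :
    msel (x :: l) m = (if m % 2 = 1 then [x] else []) ++ msel l (m >>> 1) := by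
  unfold msel
  rw [List.length_cons, List.range_succ_eq_map, List.filter_cons, List.filter_map]
  have h1 : (fun j => (m >>> j) % 2 == 1) ∘ Nat.succ = fun j => ((m >>> 1) >>> j) % 2 == 1 := by
    funext j
    simp only [Function.comp, Nat.succ_eq_add_one, ← Nat.shiftRight_add]
    rw [Nat.add_comm]
  rw [h1]
  simp only [Nat.shiftRight_zero]
  split
  case isTrue h =>
    rw [if_pos (by simpa using h)]
    simp [List.map_map, Function.comp_def]
  case isFalse h =>
    rw [if_neg (by simpa using h)]
    simp [List.map_map, Function.comp_def]

theorem msel_sublist (l : List String) (m : Nat) : (msel l m).Sublist l := by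
  induction l generalizing m with
  | nil => simp [msel]
  | cons x t ih =>
    rw [msel_cons]
    split
    · simpa using (ih (m >>> 1)).cons_cons x
    · simpa using (ih (m >>> 1)).cons x

theorem mem_msel_head (x : String) (l : List String) (m : Nat) (hnd : (x :: l).Nodup) :
    x ∈ msel (x :: l) m ↔ m % 2 = 1 := by
  rw [msel_cons]
  rcases List.nodup_cons.mp hnd with ⟨hx, -⟩
  constructor
  · intro hmem
    by_contra hodd
    rw [if_neg hodd] at hmem
    exact hx ((msel_sublist l (m >>> 1)).mem hmem)
  · intro h; rw [if_pos h]; simp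

theorem foldl_remove_filter {α : Type} [BEq α] [LawfulBEq α] (p : α → Prop) [DecidablePred p] :
    ∀ (rest pre : List α), (∀ a ∈ pre, p a) →
    rest.foldl (fun cur i => if p i then cur else (PySem.List.remove? cur i).getD cur) (pre ++ rest)
      = pre ++ rest.filter (fun a => decide (p a)) := by
  intro rest
  induction rest with
  | nil => intro pre h; simp
  | cons i rest' ih =>
    intro pre h
    rw [List.foldl_cons]
    by_cases hp : p i
    · rw [if_pos hp]
      have : pre ++ i :: rest' = (pre ++ [i]) ++ rest' := by simp
      rw [this, ih (pre ++ [i]) ?_]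
      · simp [hp]
      · intro a ha
        rcases List.mem_append.mp ha with h1 | h1
        · exact h a h1
        · rwa [List.mem_singleton.mp h1]
    · rw [if_neg hp]
      have hnotpre : i ∉ pre := fun hmem => hp (h i hmem)
      have hrem : PySem.List.remove? (pre ++ i :: rest') i = some (pre ++ rest') := by
        rw [PySem.List.remove?_eq_some_erase _ i (by simp)]
        rw [List.erase_append_right _ hnotpre, List.erase_cons_head]
      rw [hrem]
      simp only [Option.getD_some]
      rw [ih pre h]
      simp [hp]

theorem subsetsbinary_eq (l : List String) (hnd : l.Nodup) :
    subsetsbinary l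
      = ((List.range' 1 (2 ^ l.length - 1)).filter (fun m => m % 2 == 1)).map (msel l) := by
  unfold subsetsbinary
  simp only []
  have hinner : (List.range (2 ^ l.length)).foldl (fun subsets i =>
      subsets ++ [(List.range l.length).foldl (fun subset j =>
        if (i >>> j) % 2 == 1 then subset ++ [l.getD j ""] else subset) []]) []
      = (List.range (2 ^ l.length)).map (msel l) := by
    have : ∀ i ∈ List.range (2 ^ l.length), ∀ acc : List (List String),
        (fun (subsets : List (List String)) i => subsets ++ [(List.range l.length).foldl (fun subset j =>
          if (i >>> j) % 2 == 1 then subset ++ [l.getD j ""] else subset) []]) acc i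
        = (fun subsets i => subsets ++ [msel l i]) acc i := by
      intro i _ acc
      simp only [PySem.List.foldl_append_if (fun j => (i >>> j) % 2 == 1) (fun j => l.getD j "")]
      rfl
    rw [PySem.List.foldl_congr_mem' _ _ _ _ this,
        PySem.List.foldl_append_singleton_eq_map]
    rfl
  rw [hinner]
  have htail : ((List.range (2 ^ l.length)).map (msel l)).tail
      = (List.range' 1 (2 ^ l.length - 1)).map (msel l) := by
    have h2 : 2 ^ l.length = (2 ^ l.length - 1) + 1 := (Nat.succ_pred_eq_of_pos (by positivity)).symm
    rw [List.range_eq_range', h2, List.range'_succ, List.map_cons, List.tail_cons]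
    simp
  rw [htail]
  have hrem := foldl_remove_filter (fun S => l.headI ∈ S)
    ((List.range' 1 (2 ^ l.length - 1)).map (msel l)) [] (by intro a ha; cases ha)
  simp only [List.nil_append] at hrem
  rw [hrem, List.filter_map]
  congr 1
  apply List.filter_congr
  intro m hm
  rcases l with _ | ⟨x, l'⟩
  · simp at hm
  · simp only [Function.comp, List.headI]
    rw [Bool.eq_iff_iff]
    simp only [decide_eq_true_eq, beq_iff_eq]
    exact mem_msel_head x l' m hnd

theorem erase_insert_of_not_contains {κ ν : Type} [BEq κ] [LawfulBEq κ]
    (d : PySem.Dict κ ν) (k : κ) (v : ν) (h : d.contains k = false) :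
    (d.insert k v).erase k = d := by
  have hins : d.insert k v = PySem.Dict.mk (d.items ++ [(k, v)]) := by
    unfold PySem.Dict.insert
    rw [if_neg (by simp [h])]
  rw [hins]
  unfold PySem.Dict.erase
  simp only [List.filter_append]
  have h1 : d.items.filter (fun p => !p.1 == k) = d.items := by
    apply List.filter_eq_self.mpr
    intro p hp
    have : (p.1 == k) = false := by
      by_contra hc
      have : d.contains k := by
        unfold PySem.Dict.contains
        exact List.any_eq_true.mpr ⟨p, hp, by simpa using hc⟩
      simp [this] at h
    simp [this]
  have h2 : [(k, v)].filter (fun p : κ × ν => !p.1 == k) = [] := by simp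
  rw [h1, h2, List.append_nil]

theorem tmp_step_eq :
    ∀ (ps : List (String × Int)) (d : PySem.Dict String Int), d.contains "Null Set" = false →
    ps.foldl (fun (tmp : PySem.Dict String Int) p =>
      let tmp := if tmp.contains p.1 then tmp.insert p.1 (tmp.getD p.1 0 + p.2)
                 else tmp.insert p.1 p.2
      if tmp.contains "Null Set" then tmp.erase "Null Set" else tmp) d
    = ps.foldl (fun (tmp : PySem.Dict String Int) p =>
      if p.1 == "Null Set" then tmp else tmp.insert p.1 (tmp.getD p.1 0 + p.2)) d := by
  intro ps
  induction ps with
  | nil => intro d h; rfl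
  | cons p rest ih =>
    intro d h
    rw [List.foldl_cons, List.foldl_cons]
    by_cases hk : p.1 = "Null Set"
    · have hstep : (let tmp := if d.contains p.1 then d.insert p.1 (d.getD p.1 0 + p.2)
                 else d.insert p.1 p.2
          if tmp.contains "Null Set" then tmp.erase "Null Set" else tmp) = d := by
        simp only [hk, h, if_neg Bool.false_ne_true]
        rw [if_pos (PySem.Dict.contains_insert_self d "Null Set" p.2)]
        exact erase_insert_of_not_contains d _ _ h
      rw [hstep, if_pos (by simp [hk])]
      exact ih d h
    · have hins : (if d.contains p.1 then d.insert p.1 (d.getD p.1 0 + p.2)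
                 else d.insert p.1 p.2) = d.insert p.1 (d.getD p.1 0 + p.2) := by
        by_cases hc : d.contains p.1
        · rw [if_pos hc]
        · rw [if_neg hc, PySem.Dict.getD_of_not_contains d 0 (by simpa using hc), Int.zero_add]
      have hcont : (d.insert p.1 (d.getD p.1 0 + p.2)).contains "Null Set" = false := by
        rw [PySem.Dict.contains_insert]
        simp only [h, Bool.or_false]
        exact beq_false_of_ne (fun hc => hk hc.symm)
      have hstep : (let tmp := if d.contains p.1 then d.insert p.1 (d.getD p.1 0 + p.2)
                 else d.insert p.1 p.2
          if tmp.contains "Null Set" then tmp.erase "Null Set" else tmp)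
          = d.insert p.1 (d.getD p.1 0 + p.2) := by
        simp only [hins, hcont, if_neg Bool.false_ne_true]
      rw [hstep, if_neg (by simp [hk])]
      exact ih _ hcont

theorem getD_foldl_insert_add (g : List String → Int) :
    ∀ (l : List (List String)) (d : PySem.Dict (List String) Int) (S : List String), l.Nodup →
    (l.foldl (fun sup s => sup.insert s (sup.getD s 0 + g s)) d).getD S 0
      = d.getD S 0 + (if S ∈ l then g S else 0) := by
  intro l
  induction l with
  | nil => intro d S _; simp
  | cons s rest ih =>
    intro d S hnd
    rcases List.nodup_cons.mp hnd with ⟨hs, hrest⟩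
    rw [List.foldl_cons, ih _ S hrest]
    by_cases hSs : S = s
    · subst hSs
      rw [if_neg hs, PySem.Dict.getD_insert]
      simp
    · rw [PySem.Dict.getD_insert, if_neg hSs]
      by_cases hmem : S ∈ rest <;> simp [hmem, hSs]

theorem getD_foldl_foldl_insert_add
    (g : List (String × Int) → List String → Int) (sub : List (String × Int) → List (List String)) :
    ∀ (trees : List (List (String × Int))) (d : PySem.Dict (List String) Int) (S : List String),
    (∀ t ∈ trees, (sub t).Nodup) →
    (trees.foldl (fun sup t => (sub t).foldl (fun sup s => sup.insert s (sup.getD s 0 + g t s)) sup) d).getD S 0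
      = d.getD S 0 + (trees.map (fun t => if S ∈ sub t then g t S else 0)).sum := by
  intro trees
  induction trees with
  | nil => intro d S _; simp
  | cons t rest ih =>
    intro d S h
    rw [List.foldl_cons, ih _ S (fun t' ht' => h t' (List.mem_cons_of_mem _ ht')),
        getD_foldl_insert_add (g t) _ d S (h t List.mem_cons_self)]
    simp [Int.add_assoc]

theorem sgen_eq_sublists (P : List String) :
    P.foldl (fun subs item => subs ++ subs.map (fun s => s ++ [item])) [[]] = P.sublists := by
  induction P using List.reverseRecOn with
  | nil => rfl
  | append_singleton l a ih => rw [List.foldl_concat, ih, List.sublists_concat]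

theorem mem_tail_sublists (P : List String) (S : List String) (hnd : P.Nodup) (hne : S ≠ []) :
    S ∈ P.sublists.tail ↔ S.Sublist P := by
  have hhead : ∃ t, P.sublists = [] :: t := by
    rw [← sgen_eq_sublists]
    suffices h : ∀ (Q : List String) (t0 : List (List String)),
        ∃ t, Q.foldl (fun subs item => subs ++ subs.map (fun s => s ++ [item])) ([] :: t0) = [] :: t by
      exact h P []
    intro Q
    induction Q with
    | nil => intro t0; exact ⟨t0, rfl⟩
    | cons a Q' ih =>
      intro t0
      rw [List.foldl_cons]
      simpa using ih _
  rcases hhead with ⟨t, ht⟩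
  have hnodup : P.sublists.Nodup := List.nodup_sublists.mpr hnd
  rw [ht] at hnodup ⊢
  rcases List.nodup_cons.mp hnodup with ⟨hnil, -⟩
  rw [List.tail_cons]
  constructor
  · intro hmem
    exact List.mem_sublists.mp (ht ▸ List.mem_cons_of_mem _ hmem)
  · intro hsub
    have : S ∈ [] :: t := ht ▸ List.mem_sublists.mpr hsub
    rcases List.mem_cons.mp this with h1 | h1
    · exact absurd h1 hne
    · exact h1

theorem sublist_filter_iff (S l : List String) (q : String → Bool) (hS : S.Sublist l) :
    S.Sublist (l.filter q) ↔ ∀ x ∈ S, q x = true := by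
  constructor
  · intro h x hx
    exact (List.mem_filter.mp (h.mem hx)).2
  · intro h
    have : S.filter q = S := List.filter_eq_self.mpr h
    rw [← this]
    exact hS.filter q

theorem count_eq (trees : List (List (String × Int))) (items : List String) (hnd : items.Nodup)
    (S : List String) (hS : S.Sublist items) (hne : S ≠ []) :
    trees.foldl (fun count tree =>
      if ((S.foldl (fun c si => if (PySem.Dict.mk tree).contains si then c + 1 else c) 0 : Int) == (S.length : Int))
      then count + (PySem.Dict.mk tree).getD (S.getLastD "") 0 else count) 0
    = (trees.foldl (fun support tree =>
        ((items.foldl (fun subs item =>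
          if (PySem.Dict.mk tree).contains item then subs ++ subs.map (fun s => s ++ [item]) else subs) [[]]).tail).foldl
          (fun sup s => sup.insert s (sup.getD s 0 + (PySem.Dict.mk tree).getD (s.getLastD "") 0)) support) PySem.Dict.empty).getD S 0 := by
  have hsubs : ∀ tree : List (String × Int),
      (items.foldl (fun subs item =>
        if (PySem.Dict.mk tree).contains item then subs ++ subs.map (fun s => s ++ [item]) else subs) [[]])
      = (items.filter (fun it => (PySem.Dict.mk tree).contains it)).sublists := by
    intro tree
    rw [PySem.List.foldl_if_eq_foldl_filter (fun it => (PySem.Dict.mk tree).contains it)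
      (fun subs item => subs ++ subs.map (fun s => s ++ [item])) items [[]]]
    exact sgen_eq_sublists _
  rw [getD_foldl_foldl_insert_add (fun tree s => (PySem.Dict.mk tree).getD (s.getLastD "") 0)
      (fun tree => (items.foldl (fun subs item =>
        if (PySem.Dict.mk tree).contains item then subs ++ subs.map (fun s => s ++ [item]) else subs) [[]]).tail)
      trees PySem.Dict.empty S ?hnodup]
  case hnodup =>
    intro t _
    dsimp only
    rw [hsubs t]
    exact ((List.nodup_sublists.mpr (hnd.filter _)).sublist (List.tail_sublist _))
  rw [PySem.Dict.getD_empty, Int.zero_add]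
  have hbody : ∀ tree ∈ trees, ∀ count : Int,
      (if ((S.foldl (fun c si => if (PySem.Dict.mk tree).contains si then c + 1 else c) 0 : Int) == (S.length : Int))
       then count + (PySem.Dict.mk tree).getD (S.getLastD "") 0 else count)
      = count + (if S.Sublist (items.filter (fun it => (PySem.Dict.mk tree).contains it))
                 then (PySem.Dict.mk tree).getD (S.getLastD "") 0 else 0) := by
    intro tree _ count
    rw [PySem.List.foldl_if_add_one (fun si => (PySem.Dict.mk tree).contains si) S 0, Int.zero_add]
    by_cases hcov : ∀ x ∈ S, (PySem.Dict.mk tree).contains x = true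
    · have h1 : S.countP (fun si => (PySem.Dict.mk tree).contains si) = S.length :=
        List.countP_eq_length.mpr hcov
      have h2 : S.Sublist (items.filter (fun it => (PySem.Dict.mk tree).contains it)) :=
        (sublist_filter_iff S items _ hS).mpr hcov
      rw [h1, if_pos h2, if_pos (by simp)]
    · have h1 : S.countP (fun si => (PySem.Dict.mk tree).contains si) ≠ S.length := by
        intro hc; exact hcov (List.countP_eq_length.mp hc)
      have h2 : ¬ S.Sublist (items.filter (fun it => (PySem.Dict.mk tree).contains it)) := by
        intro hc; exact hcov ((sublist_filter_iff S items _ hS).mp hc)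
      have h3 : (((S.countP (fun si => (PySem.Dict.mk tree).contains si) : Int)) == (S.length : Int)) = false := by
        rw [beq_eq_false_iff_ne]
        exact fun hc => h1 (by exact_mod_cast hc)
      rw [if_neg h2, h3]
      simp
  rw [PySem.List.foldl_congr_mem' trees _ _ 0 hbody, PySem.List.foldl_add, Int.zero_add]
  apply congrArg
  apply List.map_congr_left
  intro t _
  dsimp only
  rw [hsubs t]
  simp only [mem_tail_sublists _ S (hnd.filter _) hne]

theorem pvKeyStep_eq (ml : Int)
    (st : PySem.Dict (List String) Int × List (List (String × Int)) × PySem.Dict (List String) Int)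
    (kv : String × List (List (String × Int))) :
    pvKeyStepA ml st kv = pvKeyStepB ml st kv := by
  simp only [pvKeyStepA, pvKeyStepB]
  -- tmp equality
  rw [← List.foldl_flatten (f := fun (tmp : PySem.Dict String Int) (p : String × Int) =>
        let tmp := if tmp.contains p.1 then tmp.insert p.1 (tmp.getD p.1 0 + p.2)
                   else tmp.insert p.1 p.2
        if tmp.contains "Null Set" then tmp.erase "Null Set" else tmp),
      ← List.foldl_flatten (f := fun (tmp : PySem.Dict String Int) (p : String × Int) =>
        if p.1 == "Null Set" then tmp else tmp.insert p.1 (tmp.getD p.1 0 + p.2)),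
      tmp_step_eq kv.2.flatten PySem.Dict.empty (PySem.Dict.contains_empty _)]
  set T : PySem.Dict String Int := kv.2.flatten.foldl (fun tmp p =>
      if p.1 == "Null Set" then tmp else tmp.insert p.1 (tmp.getD p.1 0 + p.2)) PySem.Dict.empty with hT
  have hTnodup : T.keys.Nodup := by
    rw [hT, PySem.List.foldl_congr_mem' kv.2.flatten _
        (fun (tmp : PySem.Dict String Int) p =>
          if !(p.1 == "Null Set") then tmp.insert p.1 (tmp.getD p.1 0 + p.2) else tmp) _
        (by intro p _ acc; cases hq : p.1 == "Null Set" <;> simp [hq]),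
      PySem.List.foldl_if_eq_foldl_filter (fun p : String × Int => !(p.1 == "Null Set"))
        (fun (tmp : PySem.Dict String Int) p => tmp.insert p.1 (tmp.getD p.1 0 + p.2))]
    exact PySem.Dict.nodup_keys_foldl_insert_key
      (List.filter (fun p => !p.1 == "Null Set") kv.2.flatten) (fun p : String × Int => p.1)
      (fun tmp p => tmp.getD p.1 0 + p.2) PySem.Dict.empty PySem.Dict.nodup_keys_empty
  -- A's freqset dict is the filtered items list
  have hfreqnodup : ((T.items.filter (fun p => decide (ml ≤ p.2))).map (fun p : String × Int => p.1)).Nodup :=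
    (List.filter_sublist.map (fun p : String × Int => p.1)).nodup hTnodup
  have hfreq : (T.items.foldl (fun fs p => if ml ≤ p.2 then fs.insert p.1 p.2 else fs) PySem.Dict.empty).items
      = T.items.filter (fun p => decide (ml ≤ p.2)) := by
    rw [PySem.List.foldl_ite_eq_foldl_filter (fun p : String × Int => ml ≤ p.2)
        (fun (fs : PySem.Dict String Int) p => fs.insert p.1 p.2)]
    rw [PySem.Dict.items_foldl_insert_fresh _ (fun p : String × Int => p.1) (fun p : String × Int => p.2)
        PySem.Dict.empty (fun a _ => PySem.Dict.contains_empty _) hfreqnodup]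
    show PySem.Dict.empty.items ++ _ = _
    have : (PySem.Dict.empty : PySem.Dict String Int).items = [] := rfl
    rw [this, List.nil_append]
    simp
  have hkeys : (T.items.foldl (fun fs p => if ml ≤ p.2 then fs.insert p.1 p.2 else fs) PySem.Dict.empty).keys
      = (T.items.filter (fun p => decide (ml ≤ p.2))).map (fun p : String × Int => p.1) := by
    unfold PySem.Dict.keys
    rw [hfreq]
  rw [hfreq, hkeys]
  set F := T.items.filter (fun p => decide (ml ≤ p.2)) with hF
  set items := F.map (fun p : String × Int => p.1) with hitems
  have hitemsnodup : items.Nodup := hfreqnodup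
  rw [subsetsbinary_eq items hitemsnodup]
  rw [List.foldl_map]
  have hand : ∀ m : Nat, (m &&& 1 == 1) = (m % 2 == 1) := fun m => by rw [Nat.and_one_is_mod]
  simp only [hand]
  rw [PySem.List.foldl_if_eq_foldl_filter (fun m : Nat => m % 2 == 1)
      (fun (ad : PySem.Dict (List String) Int × PySem.Dict (List String) Int) m =>
        ((if ml ≤ (kv.2.foldl (fun support tree =>
              ((items.foldl (fun subs item =>
                if (PySem.Dict.mk tree).contains item then subs ++ subs.map (fun s => s ++ [item]) else subs) [[]]).tail).foldl
                (fun sup s => sup.insert s (sup.getD s 0 + (PySem.Dict.mk tree).getD (s.getLastD "") 0)) support) PySem.Dict.empty).getD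
                (((List.range items.length).filter (fun j => (m >>> j) % 2 == 1)).map (fun j => items.getD j "")) 0
          then ad.1.insert (((List.range items.length).filter (fun j => (m >>> j) % 2 == 1)).map (fun j => items.getD j ""))
            ((kv.2.foldl (fun support tree =>
              ((items.foldl (fun subs item =>
                if (PySem.Dict.mk tree).contains item then subs ++ subs.map (fun s => s ++ [item]) else subs) [[]]).tail).foldl
                (fun sup s => sup.insert s (sup.getD s 0 + (PySem.Dict.mk tree).getD (s.getLastD "") 0)) support) PySem.Dict.empty).getD
                (((List.range items.length).filter (fun j => (m >>> j) % 2 == 1)).map (fun j => items.getD j "")) 0)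
          else ad.1),
         ad.2.insert (((List.range items.length).filter (fun j => (m >>> j) % 2 == 1)).map (fun j => items.getD j ""))
            ((kv.2.foldl (fun support tree =>
              ((items.foldl (fun subs item =>
                if (PySem.Dict.mk tree).contains item then subs ++ subs.map (fun s => s ++ [item]) else subs) [[]]).tail).foldl
                (fun sup s => sup.insert s (sup.getD s 0 + (PySem.Dict.mk tree).getD (s.getLastD "") 0)) support) PySem.Dict.empty).getD
                (((List.range items.length).filter (fun j => (m >>> j) % 2 == 1)).map (fun j => items.getD j "")) 0)))
      (List.range' 1 (2 ^ items.length - 1)) (st.1, st.2.2)]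
  refine congrArg (fun z => (Prod.fst z, st.2.1 ++ [F], Prod.snd z)) ?_
  apply PySem.List.foldl_congr_mem'
  intro m hm ad
  rcases List.mem_filter.mp hm with ⟨hmr, hmodd⟩
  have hodd : m % 2 = 1 := by simpa using hmodd
  have hmlt : 1 ≤ m ∧ m < 1 + (2 ^ items.length - 1) := by simpa using List.mem_range'_1.mp hmr
  have hitemsne : items ≠ [] := by
    intro hnil
    rw [hnil] at hmlt
    simp at hmlt
    omega
  have hne : msel items m ≠ [] := by
    rcases hx : items with _ | ⟨x, l'⟩
    · exact absurd hx hitemsne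
    · rw [msel_cons, if_pos hodd]; simp
  rw [show ((List.range items.length).filter (fun j => (m >>> j) % 2 == 1)).map (fun j => items.getD j "") = msel items m from rfl]
  rw [← count_eq kv.2 items hitemsnodup (msel items m) (msel_sublist items m) hne]

-- ===== VERDICT (by name: the statement is the Claim_ definition above) =====
theorem countfptree_spec : Claim_equal_countfptree := by
  intro acp ml _
  unfold Spec_countfptree countfptree countfptree_alt
  rw [PySem.List.foldl_congr_mem' acp (pvKeyStepA ml) (pvKeyStepB ml) _
    (fun kv _ st => pvKeyStep_eq ml st kv)]
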